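-- pv_equiv track=rewrite | github.com/KiseongLee/AlgorithmStudy | ProgrammersHighscoreKit/Hash/전화번호목록.py | solution
-- ===== SOURCE A (Python) =====
-- def solution(phone_book):
--     answer = True
--     phone_book.sort(key=lambda x: len(x))
--     for i in range(len(phone_book)):
--         for j in range(i+1, len(phone_book)):
--             for k in range(len(phone_book[i])):
--               if phone_book[i][k] == phone_book[j][k]:
--                  answer = False
--                  return answer
--
--     return answer
-- ===== SOURCE B (Python) =====
-- def solution(phone_book):
--     # Per-position bucketing: a pair shares a char at a common position k
--     # iff some char repeats at position k; one set per position instead of all pairs.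
--     # (A also sorts phone_book in place; B does not mutate its argument.)
--     maxlen = max(map(len, phone_book), default=0)
--     for k in range(maxlen):
--         seen = set()
--         for s in phone_book:
--             if k < len(s):
--                 c = s[k]
--                 if c in seen:
--                     return False
--                 seen.add(c)
--     return True
-- ===== Notes on version B (the rewrite author's own statement) =====
-- stated objective: alternative
-- what changed: A sorts by length and compares every pair of numbers character by character; B keeps one set of seen characters per char position and reports a collision as soon as a character repeats at some position, with no sort and no pairwise scan (B also does not mutate the input list, while A sorts it in place).
import Mathlib
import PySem

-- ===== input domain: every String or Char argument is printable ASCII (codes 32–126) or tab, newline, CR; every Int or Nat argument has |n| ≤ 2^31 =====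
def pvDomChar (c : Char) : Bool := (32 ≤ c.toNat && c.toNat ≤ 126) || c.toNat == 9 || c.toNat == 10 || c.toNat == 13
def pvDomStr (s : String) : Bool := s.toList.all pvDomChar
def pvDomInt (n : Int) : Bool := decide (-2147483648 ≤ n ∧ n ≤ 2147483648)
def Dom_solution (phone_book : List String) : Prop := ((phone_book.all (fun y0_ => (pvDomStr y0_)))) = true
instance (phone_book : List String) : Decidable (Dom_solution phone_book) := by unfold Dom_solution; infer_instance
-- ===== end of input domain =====

-- B replaces A's sort + all-pairs scan by one duplicate-detecting set per char position.
-- NOTE: Python A sorts phone_book in place (observable mutation); B does not — the equivalence proved is about the return value.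

-- ===== PORT A =====
-- inner k-loop: for k in range(len(si)): if si[k] == sj[k]: found (early return)
def solInnerK (si sj : String) : Bool :=
  (PySem.List.pyRange 0 (PySem.Str.len si) 1).any
    (fun k => PySem.Str.pyGet? si k == PySem.Str.pyGet? sj k)

-- outer i/j loops over the sorted list, with the early 'return False'
def solGo : List String → Bool
  | [] => true
  | s :: rest => if rest.any (fun t => solInnerK s t) then false else solGo rest

def solution (phone_book : List String) : Bool :=
  solGo (PySem.List.sorted phone_book (fun x => PySem.Str.len x))

-- ===== PORT B =====
-- inner loop of B: scan the strings, collecting the char at position k of each long-enough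
-- string into a set; true as soon as a char repeats ('return False')
def altPos (k : Int) : List String → PySem.Set Char → Bool
  | [], _ => false
  | s :: rest, seen =>
    if k < PySem.Str.len s then
      match PySem.Str.pyGet? s k with
      | some c =>
        if PySem.Set.contains seen c then true else altPos k rest (PySem.Set.add seen c)
      | none => altPos k rest seen  -- unreachable: 0 ≤ k < len s
    else altPos k rest seen

def solution_alt (phone_book : List String) : Bool :=
  let maxlen := phone_book.foldl (fun m s => max m (PySem.Str.len s)) 0
  !((PySem.List.pyRange 0 maxlen 1).any (fun k => altPos k phone_book PySem.Set.empty))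

-- ===== PRECONDITION & SPEC =====
def Spec_solution (phone_book : List String) (out : Bool) : Prop := out = solution_alt phone_book
instance (phone_book : List String) (out : Bool) : Decidable (Spec_solution phone_book out) := by unfold Spec_solution; infer_instance

-- ===== CLAIM (what is proved, stated in full; the proofs are below) =====
def Claim_equal_solution : Prop := ∀ (phone_book : List String), Dom_solution phone_book → Spec_solution phone_book (solution phone_book)

-- ===== LEMMAS AND PROOFS =====

-- the shared character-match condition: positions m where both strings carry the same char
def matchAt (m : Nat) (s t : String) : Prop := ∃ c, s.toList[m]? = some c ∧ t.toList[m]? = some c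

theorem matchAt_symm {m : Nat} {s t : String} (h : matchAt m s t) : matchAt m t s := by
  obtain ⟨c, h1, h2⟩ := h; exact ⟨c, h2, h1⟩

theorem solInnerK_eq_true_iff (s t : String) :
    solInnerK s t = true ↔ ∃ m : Nat, matchAt m s t := by
  unfold solInnerK
  rw [List.any_eq_true]
  constructor
  · rintro ⟨k, hk, hbeq⟩
    rw [PySem.List.mem_pyRange_one] at hk
    obtain ⟨m, rfl⟩ := Int.eq_ofNat_of_zero_le hk.1
    rw [PySem.Str.len_eq] at hk
    have hm : m < s.toList.length := by exact_mod_cast hk.2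
    rw [PySem.Str.pyGet?_natCast, PySem.Str.pyGet?_natCast, beq_iff_eq] at hbeq
    refine ⟨m, s.toList[m], List.getElem?_eq_getElem hm, ?_⟩
    rw [← hbeq]; exact List.getElem?_eq_getElem hm
  · rintro ⟨m, c, h1, h2⟩
    obtain ⟨hm, -⟩ := List.getElem?_eq_some_iff.1 h1
    refine ⟨(m : Int), ?_, ?_⟩
    · rw [PySem.List.mem_pyRange_one, PySem.Str.len_eq]
      omega
    · rw [PySem.Str.pyGet?_natCast, PySem.Str.pyGet?_natCast, beq_iff_eq, h1, h2]

theorem solGo_eq_true_iff (l : List String) :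
    solGo l = true ↔ l.Pairwise (fun s t => solInnerK s t = false) := by
  induction l with
  | nil => simp [solGo]
  | cons s rest ih =>
    rw [List.pairwise_cons]
    cases h : rest.any (fun t => solInnerK s t) with
    | true =>
      have hred : solGo (s :: rest) = false := by simp [solGo, h]
      rw [hred]
      obtain ⟨t, ht, hin⟩ := List.any_eq_true.1 h
      constructor
      · intro hf; exact absurd hf (by simp)
      · rintro ⟨hall, -⟩; rw [hall t ht] at hin; exact absurd hin (by simp)
    | false =>
      have hred : solGo (s :: rest) = solGo rest := by simp [solGo, h]
      rw [hred, ih]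
      have hall : ∀ t ∈ rest, solInnerK s t = false := by
        intro t ht; have := List.any_eq_false.1 h t ht; simpa using this
      constructor
      · intro hp; exact ⟨hall, hp⟩
      · rintro ⟨-, hp⟩; exact hp

-- A = true iff no two entries of the ORIGINAL list share a char at a common position
theorem solution_eq_true_iff (pb : List String) :
    solution pb = true ↔ pb.Pairwise (fun s t => ∀ m : Nat, ¬ matchAt m s t) := by
  unfold solution
  rw [solGo_eq_true_iff]
  have hperm := PySem.List.sorted_perm pb (fun x => PySem.Str.len x) false
  have hstep : ∀ (l : List String),
      l.Pairwise (fun s t => solInnerK s t = false) ↔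
      l.Pairwise (fun s t => ∀ m : Nat, ¬ matchAt m s t) := by
    intro l
    rw [List.pairwise_iff_getElem, List.pairwise_iff_getElem]
    constructor
    · intro h i j hi hj hij m hm
      have := h i j hi hj hij
      rw [← Bool.not_eq_true, solInnerK_eq_true_iff] at this
      exact this ⟨m, hm⟩
    · intro h i j hi hj hij
      rw [← Bool.not_eq_true, solInnerK_eq_true_iff]
      rintro ⟨m, hm⟩
      exact h i j hi hj hij m hm
  rw [hstep]
  refine List.Perm.pairwise_iff ?_ hperm
  intro x y h m hm
  exact h m (matchAt_symm hm)

theorem altPos_eq_true_iff (m : Nat) (l : List String) (seen : PySem.Set Char) :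
    altPos (m : Int) l seen = true ↔
      (∃ s ∈ l, ∃ c, s.toList[m]? = some c ∧ c ∈ seen) ∨
      ¬ l.Pairwise (fun s t => ¬ matchAt m s t) := by
  induction l generalizing seen with
  | nil => simp [altPos]
  | cons s rest ih =>
    rw [List.pairwise_cons]
    have hstep : altPos (m : Int) (s :: rest) seen =
        if (m : Int) < PySem.Str.len s then
          match PySem.Str.pyGet? s (m : Int) with
          | some c => if PySem.Set.contains seen c then true
                      else altPos (m : Int) rest (PySem.Set.add seen c)
          | none => altPos (m : Int) rest seen
        else altPos (m : Int) rest seen := rfl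
    by_cases hlen : m < s.toList.length
    · have hget : PySem.Str.pyGet? s (m : Int) = some s.toList[m] := by
        rw [PySem.Str.pyGet?_natCast]; exact List.getElem?_eq_getElem hlen
      have hcond : ((m : Int) < PySem.Str.len s) := by
        rw [PySem.Str.len_eq]; exact_mod_cast hlen
      by_cases hseen : s.toList[m] ∈ seen
      · have hcont : PySem.Set.contains seen s.toList[m] = true :=
          (PySem.Set.contains_iff seen _).2 hseen
        have hred : altPos (m : Int) (s :: rest) seen = true := by
          rw [hstep, if_pos hcond, hget]
          show (if PySem.Set.contains seen s.toList[m] = true then true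
                else altPos (m : Int) rest (seen.add s.toList[m])) = true
          rw [hcont]
          rfl
        rw [hred]
        constructor
        · intro _
          exact Or.inl ⟨s, List.mem_cons_self .., s.toList[m],
            List.getElem?_eq_getElem hlen, hseen⟩
        · intro _; rfl
      · have hcont : PySem.Set.contains seen s.toList[m] = false := by
          rw [← Bool.not_eq_true, PySem.Set.contains_iff]; exact hseen
        have hred : altPos (m : Int) (s :: rest) seen
            = altPos (m : Int) rest (seen.add s.toList[m]) := by
          rw [hstep, if_pos hcond, hget]
          show (if PySem.Set.contains seen s.toList[m] = true then true
                else altPos (m : Int) rest (seen.add s.toList[m])) = _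
          rw [hcont]
          rfl
        rw [hred, ih]
        constructor
        · rintro (⟨t, ht, c, hc, hcs⟩ | hnp)
          · rw [PySem.Set.mem_add] at hcs
            rcases hcs with hcs | rfl
            · exact Or.inl ⟨t, List.mem_cons_of_mem _ ht, c, hc, hcs⟩
            · refine Or.inr ?_
              rintro ⟨hall, -⟩
              exact hall t ht ⟨s.toList[m], List.getElem?_eq_getElem hlen, hc⟩
          · refine Or.inr ?_; rintro ⟨-, hp⟩; exact hnp hp
        · rintro (⟨t, ht, c, hc, hcs⟩ | hnp)
          · rcases List.mem_cons.1 ht with rfl | ht'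
            · rw [List.getElem?_eq_getElem hlen, Option.some_inj] at hc
              rw [← hc] at hcs; exact absurd hcs hseen
            · exact Or.inl ⟨t, ht', c, hc, (PySem.Set.mem_add seen _ c).2 (Or.inl hcs)⟩
          · by_cases hall : ∀ t ∈ rest, ¬ matchAt m s t
            · refine Or.inr ?_; intro hp; exact hnp ⟨hall, hp⟩
            · push Not at hall
              obtain ⟨t, ht, hmt⟩ := hall
              obtain ⟨c, hc1, hc2⟩ := hmt
              rw [List.getElem?_eq_getElem hlen, Option.some_inj] at hc1
              rw [← hc1] at hc2
              exact Or.inl ⟨t, ht, s.toList[m], hc2,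
                (PySem.Set.mem_add seen _ _).2 (Or.inr rfl)⟩
    · have hcond : ¬ ((m : Int) < PySem.Str.len s) := by
        rw [PySem.Str.len_eq]; exact_mod_cast hlen
      have hnone : s.toList[m]? = none := List.getElem?_eq_none (by omega)
      have hred : altPos (m : Int) (s :: rest) seen = altPos (m : Int) rest seen := by
        rw [hstep, if_neg hcond]
      rw [hred, ih]
      constructor
      · rintro (⟨t, ht, hc⟩ | hnp)
        · exact Or.inl ⟨t, List.mem_cons_of_mem _ ht, hc⟩
        · refine Or.inr ?_; rintro ⟨-, hp⟩; exact hnp hp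
      · rintro (⟨t, ht, c, hc, hcs⟩ | hnp)
        · rcases List.mem_cons.1 ht with rfl | ht'
          · rw [hnone] at hc; exact absurd hc (by simp)
          · exact Or.inl ⟨t, ht', c, hc, hcs⟩
        · by_cases hp : rest.Pairwise (fun s t => ¬ matchAt m s t)
          · refine Or.inr ?_
            refine absurd ⟨?_, hp⟩ hnp
            rintro t - ⟨c, hc, -⟩
            rw [hnone] at hc; exact absurd hc (by simp)
          · exact Or.inr hp

theorem solution_alt_eq_true_iff (pb : List String) :
    solution_alt pb = true ↔ pb.Pairwise (fun s t => ∀ m : Nat, ¬ matchAt m s t) := by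
  unfold solution_alt
  simp only [Bool.not_eq_true', List.any_eq_false]
  have hmax := PySem.List.le_foldl_max_int pb (fun s => PySem.Str.len s) 0
  constructor
  · intro h
    rw [List.pairwise_iff_getElem]
    intro i j hi hj hij m hm
    obtain ⟨c, hc1, hc2⟩ := hm
    obtain ⟨hlen, -⟩ := List.getElem?_eq_some_iff.1 hc1
    have hmL : (m : Int) < pb.foldl (fun m s => max m (PySem.Str.len s)) 0 := by
      have := hmax.2 pb[i] (List.getElem_mem hi)
      rw [PySem.Str.len_eq] at this
      omega
    have hk : (m : Int) ∈ PySem.List.pyRange 0 (pb.foldl (fun m s => max m (PySem.Str.len s)) 0) 1 :=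
      PySem.List.mem_pyRange_one.2 ⟨by omega, hmL⟩
    have hfalse := h (m : Int) hk
    rw [altPos_eq_true_iff] at hfalse
    apply hfalse
    refine Or.inr ?_
    rw [List.pairwise_iff_getElem]
    intro hp
    exact hp i j hi hj hij ⟨c, hc1, hc2⟩
  · intro h k hk
    rw [PySem.List.mem_pyRange_one] at hk
    obtain ⟨m, rfl⟩ := Int.eq_ofNat_of_zero_le hk.1
    rw [altPos_eq_true_iff]
    rintro (⟨t, -, c, -, hcs⟩ | hnp)
    · simp [PySem.Set.empty] at hcs
    · refine hnp ?_
      rw [List.pairwise_iff_getElem] at h ⊢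
      intro i j hi hj hij
      exact h i j hi hj hij m

-- ===== VERDICT (by name: the statement is the Claim_ definition above) =====
theorem solution_spec : Claim_equal_solution := by
  intro pb _
  unfold Spec_solution
  rw [Bool.eq_iff_iff, solution_eq_true_iff, solution_alt_eq_true_iff]
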